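-- pv_equiv track=rewrite | github.com/flmaximwang/BioRazer-Extensions | biorazer_ex/gpu_apps/prediction_DL/prediction_archive/secondary_structure_analyzer.py | extract_sheets_from_dssp
-- ===== SOURCE A (Python) =====
-- def extract_sheets_from_dssp(ss_dict):
--     '''
--     根据 DSSP 字典提取片层信息
--     返回一个字典, 其中键是链 ID, 值是一个 tuple, (start_resi, end_resi, strand_num)
--     - strand_num: 片层的序号
--     - start_resi: 片层的起始残基 ID
--     - end_resi: 片层的结束残基 ID
--
--     ss_dict 是一个字典, 其中键是链 ID, 值是一个字典, 其中键是残基 ID, 值是二级结构类型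
--     '''
--
--     res = {}
--     for chain_id, ss in ss_dict.items():
--         res[chain_id] = []
--         sheet_start = None
--         sheet_end = None
--         strand_num = None
--         for res_id, ss_type in ss.items():
--             if ss_type == 'E':
--                 if sheet_start is None:
--                     sheet_start = res_id
--                     strand_num = 1
--                 sheet_end = res_id
--             else:
--                 if sheet_start is not None:
--                     res[chain_id].append((sheet_start, sheet_end, strand_num))
--                     sheet_start = None
--                     sheet_end = None
--                     strand_num = None
--         if sheet_start is not None:
--             res[chain_id].append((sheet_start, sheet_end, strand_num))
--     return res
-- ===== SOURCE B (Python) =====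
-- def extract_sheets_from_dssp(ss_dict):
--     res = {}
--     for chain_id, ss in ss_dict.items():
--         ids = list(ss.keys())
--         es = [t == 'E' for t in ss.values()]
--         # boundary detection: a run start is an 'E' whose predecessor is not 'E',
--         # a run end is an 'E' whose successor is not 'E'; pair them up in order.
--         starts = [r for r, e, p in zip(ids, es, [False] + es) if e and not p]
--         ends = [r for r, e, nx in zip(ids, es, es[1:] + [False]) if e and not nx]
--         res[chain_id] = [(s, t, 1) for s, t in zip(starts, ends)]
--     return res
-- ===== Notes on version B (the rewrite author's own statement) =====
-- stated objective: alternative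
-- what changed: Replaces A's running sheet_start/sheet_end/strand_num state machine with post-loop flush by stateless boundary detection: zip each residue with its neighbour types, collect run starts ('E' after non-'E') and run ends ('E' before non-'E'), and pair them up.
import Mathlib
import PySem

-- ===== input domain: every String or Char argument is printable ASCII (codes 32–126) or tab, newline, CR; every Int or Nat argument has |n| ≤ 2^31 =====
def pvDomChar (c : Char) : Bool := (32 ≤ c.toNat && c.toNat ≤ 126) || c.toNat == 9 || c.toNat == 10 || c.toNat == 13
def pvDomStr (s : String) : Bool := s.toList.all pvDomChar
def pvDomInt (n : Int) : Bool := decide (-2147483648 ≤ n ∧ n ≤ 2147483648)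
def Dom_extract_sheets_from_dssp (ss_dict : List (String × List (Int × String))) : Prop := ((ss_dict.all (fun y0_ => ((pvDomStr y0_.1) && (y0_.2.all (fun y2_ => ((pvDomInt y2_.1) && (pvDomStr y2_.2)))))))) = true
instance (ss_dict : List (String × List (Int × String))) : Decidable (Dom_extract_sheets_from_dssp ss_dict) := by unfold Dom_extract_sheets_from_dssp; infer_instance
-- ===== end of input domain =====

-- B replaces A's sheet_start/sheet_end/strand_num state machine (with its post-loop flush) by
-- stateless boundary detection: zip each residue with its neighbours' types, collect run starts
-- and run ends, and pair them up (objective: alternative decomposition, same cost).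

-- ===== PORT A =====
-- one step of A's inner loop; state = (list built so far in res[chain_id], sheet_start, sheet_end, strand_num)
-- (states with sheet_start set but sheet_end/strand_num unset are unreachable; they are no-ops here)
def pvAStep : List (Int × Int × Int) × Option Int × Option Int × Option Int → Int × String →
    List (Int × Int × Int) × Option Int × Option Int × Option Int
  | (acc, none, se, sn), kv =>
      if kv.2 == "E" then (acc, some kv.1, some kv.1, some 1) else (acc, none, se, sn)
  | (acc, some s, none, sn), kv =>
      if kv.2 == "E" then (acc, some s, some kv.1, sn) else (acc, some s, none, sn)
  | (acc, some s, some e, none), kv =>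
      if kv.2 == "E" then (acc, some s, some kv.1, none) else (acc, some s, some e, none)
  | (acc, some s, some e, some n), kv =>
      if kv.2 == "E" then (acc, some s, some kv.1, some n)
      else (acc ++ [(s, e, n)], none, none, none)

-- A's post-loop flush: append the still-open sheet if any
def pvFlush : List (Int × Int × Int) × Option Int × Option Int × Option Int → List (Int × Int × Int)
  | (acc, some s, some e, some n) => acc ++ [(s, e, n)]
  | (acc, none, _, _) => acc
  | (acc, some _, none, _) => acc
  | (acc, some _, some _, none) => acc

-- A's inner loop over ss.items() followed by the post-loop flush
def pvAChain (ss : List (Int × String)) : List (Int × Int × Int) :=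
  pvFlush (ss.foldl pvAStep ([], none, none, none))

-- A's in-dict appends to res[chain_id] only ever touch the current chain's entry, so they are the
-- local accumulator of pvAChain, inserted once; chain ids are dict keys, hence distinct, so insertion = append.
def extract_sheets_from_dssp (ss_dict : List (String × List (Int × String))) : List (String × List (Int × Int × Int)) :=
  ss_dict.foldl (fun res p => res ++ [(p.1, pvAChain p.2)]) []

-- ===== PORT B =====
def pvBChain (ss : List (Int × String)) : List (Int × Int × Int) :=
  let ids := ss.map (·.1)
  let es := ss.map (fun kv => kv.2 == "E")
  let starts := (((ids.zip es).zip (false :: es)).filter (fun x => x.1.2 && !x.2)).map (fun x => x.1.1)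
  let ends := (((ids.zip es).zip (es.drop 1 ++ [false])).filter (fun x => x.1.2 && !x.2)).map (fun x => x.1.1)
  (starts.zip ends).map (fun p => (p.1, p.2, 1))

def extract_sheets_from_dssp_alt (ss_dict : List (String × List (Int × String))) : List (String × List (Int × Int × Int)) :=
  ss_dict.foldl (fun res p => res ++ [(p.1, pvBChain p.2)]) []

-- ===== PRECONDITION & SPEC =====
def Spec_extract_sheets_from_dssp (ss_dict : List (String × List (Int × String))) (out : List (String × List (Int × Int × Int))) : Prop := out = extract_sheets_from_dssp_alt ss_dict
instance (ss_dict : List (String × List (Int × String))) (out : List (String × List (Int × Int × Int))) : Decidable (Spec_extract_sheets_from_dssp ss_dict out) := by unfold Spec_extract_sheets_from_dssp; infer_instance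

-- ===== CLAIM (what is proved, stated in full; the proofs are below) =====
def Claim_equal_extract_sheets_from_dssp : Prop := ∀ (ss_dict : List (String × List (Int × String))), Dom_extract_sheets_from_dssp ss_dict → Spec_extract_sheets_from_dssp ss_dict (extract_sheets_from_dssp ss_dict)

-- ===== LEMMAS AND PROOFS =====

-- reference recursion: the runs of consecutive 'E' residues; cur = the open run (start, last)
def pvRuns : Option (Int × Int) → List (Int × String) → List (Int × Int × Int)
  | none, [] => []
  | some (s, e), [] => [(s, e, 1)]
  | none, kv :: rest => if kv.2 == "E" then pvRuns (some (kv.1, kv.1)) rest else pvRuns none rest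
  | some (s, e), kv :: rest =>
      if kv.2 == "E" then pvRuns (some (s, kv.1)) rest else (s, e, 1) :: pvRuns none rest

def pvNextE : List (Int × String) → Bool
  | [] => false
  | kv :: _ => kv.2 == "E"

def pvStartsF (p : Bool) : List (Int × String) → List Int
  | [] => []
  | kv :: rest => (if (kv.2 == "E") && !p then [kv.1] else []) ++ pvStartsF (kv.2 == "E") rest

def pvEndsF : List (Int × String) → List Int
  | [] => []
  | kv :: rest => (if (kv.2 == "E") && !(pvNextE rest) then [kv.1] else []) ++ pvEndsF rest

def pvStOf (acc : List (Int × Int × Int)) :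
    Option (Int × Int) → List (Int × Int × Int) × Option Int × Option Int × Option Int
  | none => (acc, none, none, none)
  | some (s, e) => (acc, some s, some e, some 1)

theorem pvA_loop (ss : List (Int × String)) :
    ∀ (acc : List (Int × Int × Int)) (cur : Option (Int × Int)),
    pvFlush (ss.foldl pvAStep (pvStOf acc cur)) = acc ++ pvRuns cur ss := by
  induction ss with
  | nil =>
    intro acc cur
    cases cur with
    | none => simp [pvStOf, pvFlush, pvRuns]
    | some p => cases p; simp [pvStOf, pvFlush, pvRuns]
  | cons kv rest ih =>
    intro acc cur
    cases cur with
    | none =>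
      by_cases h : kv.2 == "E"
      · have hs : pvAStep (pvStOf acc none) kv = pvStOf acc (some (kv.1, kv.1)) := by
          simp [pvAStep, pvStOf, h]
        rw [List.foldl_cons, hs, ih]
        simp [pvRuns, h]
      · have hs : pvAStep (pvStOf acc none) kv = pvStOf acc none := by
          simp [pvAStep, pvStOf, h]
        rw [List.foldl_cons, hs, ih]
        simp [pvRuns, h]
    | some p =>
      obtain ⟨s, e⟩ := p
      by_cases h : kv.2 == "E"
      · have hs : pvAStep (pvStOf acc (some (s, e))) kv = pvStOf acc (some (s, kv.1)) := by
          simp [pvAStep, pvStOf, h]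
        rw [List.foldl_cons, hs, ih]
        simp [pvRuns, h]
      · have hs : pvAStep (pvStOf acc (some (s, e))) kv = pvStOf (acc ++ [(s, e, 1)]) none := by
          simp [pvAStep, pvStOf, h]
        rw [List.foldl_cons, hs, ih]
        simp [pvRuns, h]

theorem pvA_chain (ss : List (Int × String)) : pvAChain ss = pvRuns none ss := by
  have h := pvA_loop ss [] none
  simpa [pvAChain, pvStOf, pvFlush] using h

theorem pvB_starts (ss : List (Int × String)) :
    ∀ p : Bool,
    ((((ss.map (·.1)).zip (ss.map (fun kv => kv.2 == "E"))).zip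
        (p :: ss.map (fun kv => kv.2 == "E"))).filter (fun x => x.1.2 && !x.2)).map
        (fun x => x.1.1) = pvStartsF p ss := by
  induction ss with
  | nil => intro p; simp [pvStartsF]
  | cons kv rest ih =>
    intro p
    simp only [List.map_cons, List.zip_cons_cons, List.filter_cons]
    have e1 : pvStartsF p (kv :: rest) =
        (if (kv.2 == "E") && !p then [kv.1] else []) ++ pvStartsF (kv.2 == "E") rest := by
      simp only [pvStartsF]
    rw [e1, ← ih]
    by_cases h : (kv.2 == "E") && !p <;> simp [h]

theorem pvB_ends (ss : List (Int × String)) :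
    ((((ss.map (·.1)).zip (ss.map (fun kv => kv.2 == "E"))).zip
        ((ss.map (fun kv => kv.2 == "E")).drop 1 ++ [false])).filter (fun x => x.1.2 && !x.2)).map
        (fun x => x.1.1) = pvEndsF ss := by
  induction ss with
  | nil => simp [pvEndsF]
  | cons kv rest ih =>
    cases rest with
    | nil => simp [pvEndsF, pvNextE, List.filter_cons]; split <;> simp_all
    | cons kv2 rest2 =>
      simp only [List.map_cons, List.drop_succ_cons, List.drop_zero, List.cons_append,
        List.zip_cons_cons, List.filter_cons] at ih ⊢
      have e1 : pvEndsF (kv :: kv2 :: rest2) =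
          (if (kv.2 == "E") && !(kv2.2 == "E") then [kv.1] else []) ++ pvEndsF (kv2 :: rest2) := by
        simp only [pvEndsF, pvNextE]
        rfl
      rw [e1, ← ih]
      by_cases h : (kv.2 == "E") && !(kv2.2 == "E") <;> simp [h]

theorem pvZip_runs (ss : List (Int × String)) :
    ∀ cur : Option (Int × Int),
    ((match cur with
      | none => (pvStartsF false ss).zip (pvEndsF ss)
      | some (s, e) =>
          (s :: pvStartsF true ss).zip ((if pvNextE ss then [] else [e]) ++ pvEndsF ss)).map
      (fun p : Int × Int => (p.1, p.2, 1))) = pvRuns cur ss := by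
  induction ss with
  | nil =>
    intro cur
    rcases cur with _ | ⟨s, e⟩
    · simp [pvStartsF, pvEndsF, pvRuns]
    · simp [pvStartsF, pvEndsF, pvRuns, pvNextE]
  | cons kv rest ih =>
    intro cur
    have hsF : ∀ p : Bool, pvStartsF p (kv :: rest) =
        (if (kv.2 == "E") && !p then [kv.1] else []) ++ pvStartsF (kv.2 == "E") rest := by
      intro p; simp only [pvStartsF]
    have heF : pvEndsF (kv :: rest) =
        (if (kv.2 == "E") && !(pvNextE rest) then [kv.1] else []) ++ pvEndsF rest := by
      simp only [pvEndsF]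
    have hnc : pvNextE (kv :: rest) = (kv.2 == "E") := rfl
    by_cases h : kv.2 == "E"
    · rcases cur with _ | ⟨s, e⟩
      · have hmain := ih (some (kv.1, kv.1))
        simp only at hmain ⊢
        cases hnE : pvNextE rest <;> simp [hsF, heF, h, hnE, pvRuns] <;>
          simp [hnE] at hmain <;> exact hmain
      · have hmain := ih (some (s, kv.1))
        simp only at hmain ⊢
        cases hnE : pvNextE rest <;> simp [hsF, heF, h, hnc, hnE, pvRuns] <;>
          simp [hnE] at hmain <;> exact hmain
    · rcases cur with _ | ⟨s, e⟩
      · have hmain := ih none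
        simp only at hmain ⊢
        simp [hsF, heF, h, pvRuns, hmain]
      · have hmain := ih none
        simp only at hmain ⊢
        simp [hsF, heF, h, hnc, pvRuns, hmain]

theorem pvB_chain (ss : List (Int × String)) : pvBChain ss = pvRuns none ss := by
  have hz := pvZip_runs ss none
  simp only at hz
  rw [pvBChain]
  simp only [pvB_starts ss false, pvB_ends ss]
  exact hz

theorem pv_chains_eq (ss : List (Int × String)) : pvAChain ss = pvBChain ss := by
  rw [pvA_chain, pvB_chain]

-- ===== VERDICT (by name: the statement is the Claim_ definition above) =====
theorem extract_sheets_from_dssp_spec : Claim_equal_extract_sheets_from_dssp := by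
  intro ss_dict _
  unfold Spec_extract_sheets_from_dssp extract_sheets_from_dssp extract_sheets_from_dssp_alt
  have : (fun (res : List (String × List (Int × Int × Int))) (p : String × List (Int × String)) =>
      res ++ [(p.1, pvAChain p.2)]) = (fun res p => res ++ [(p.1, pvBChain p.2)]) := by
    funext res p; rw [pv_chains_eq]
  rw [this]
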